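-- pv_equiv track=rewrite | github.com/thetwoj/advent-of-code-2019 | day04/password_calculator.py | has_isolated_double
-- ===== SOURCE A (Python) =====
-- def has_isolated_double(x):
--     prev_prev_digit = None
--     prev_digit = None
--     isolated_double = False
--     for index, digit in enumerate(str(x)):
--         if index < len(str(x)) - 1:
--             next_digit = str(x)[index + 1]
--         else:
--             next_digit = None
--         # first two digits are an isolated double
--         if not prev_prev_digit and prev_digit == digit != next_digit:
--             isolated_double = True
--         # any two digits that aren't in the first or last index are an isolated double
--         if prev_prev_digit != prev_digit == digit != next_digit:
--             isolated_double = True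
--         # last two digits are an isolated double
--         if prev_prev_digit != prev_digit == digit and not next_digit:
--             isolated_double = True
--         prev_prev_digit = prev_digit
--         prev_digit = digit
--     if isolated_double:
--         return True
-- ===== SOURCE B (Python) =====
-- def has_isolated_double(x):
--     s = str(x)
--     while s:
--         n = 1
--         while n < len(s) and s[n] == s[0]:
--             n += 1
--         if n == 2:
--             return True
--         s = s[n:]
-- ===== Notes on version B (the rewrite author's own statement) =====
-- stated objective: simpler
-- what changed: Replaces the three-slot sliding window (prev_prev/prev/lookahead with three sentinel-laden conditions) by a run-length scan: advance over each maximal run of equal characters and return True when a maximal run has exactly two characters, falling off the end (None) otherwise.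
import Mathlib
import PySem

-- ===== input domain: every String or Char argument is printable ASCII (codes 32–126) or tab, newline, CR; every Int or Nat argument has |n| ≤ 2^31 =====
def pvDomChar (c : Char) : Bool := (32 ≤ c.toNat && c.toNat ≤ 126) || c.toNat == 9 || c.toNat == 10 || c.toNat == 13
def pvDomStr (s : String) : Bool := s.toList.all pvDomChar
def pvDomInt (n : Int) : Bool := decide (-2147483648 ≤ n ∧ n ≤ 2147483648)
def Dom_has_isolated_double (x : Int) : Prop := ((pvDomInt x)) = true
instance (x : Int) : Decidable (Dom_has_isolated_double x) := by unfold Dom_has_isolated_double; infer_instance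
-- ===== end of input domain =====

-- B replaces A's prev_prev/prev/lookahead sliding window by a run-length scan over maximal
-- runs of equal characters (simpler; same linear cost).

-- ===== PORT A =====
-- one loop iteration of A: state (prev_prev_digit, prev_digit, isolated_double), item (index, digit)
def stepA (s : List Char) (st : Option Char × Option Char × Bool) (p : Int × Char) :
    Option Char × Option Char × Bool :=
  let ppd := st.1; let pd := st.2.1; let iso := st.2.2
  let index := p.1; let digit := p.2
  let next : Option Char := if index < (s.length : Int) - 1 then PySem.List.pyGet? s (index + 1) else none
  -- first two digits are an isolated double
  let iso := if ppd = none ∧ pd = some digit ∧ next ≠ some digit then true else iso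
  -- any two digits that aren't in the first or last index are an isolated double
  let iso := if ppd ≠ pd ∧ pd = some digit ∧ next ≠ some digit then true else iso
  -- last two digits are an isolated double
  let iso := if ppd ≠ pd ∧ pd = some digit ∧ next = none then true else iso
  (pd, some digit, iso)

def has_isolated_double (x : Int) : Option Bool :=
  let s := PySem.Int.toChars x
  let r := (PySem.List.enumerate s 0).foldl (stepA s) (none, none, false)
  if r.2.2 then some true else none

-- ===== PORT B =====
-- Source B's outer while loop: peel one maximal run per step (inner while = takeWhile count)
def altRun (s : List Char) : Option Bool :=
  match s with
  | [] => none
  | c :: rest =>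
      let n := 1 + (rest.takeWhile (fun d => d == c)).length
      if n = 2 then some true
      else altRun (rest.dropWhile (fun d => d == c))
termination_by s.length
decreasing_by
  simp only [List.length_cons]
  exact Nat.lt_succ_of_le (List.length_dropWhile_le _ _)

def has_isolated_double_alt (x : Int) : Option Bool :=
  altRun (PySem.Int.toChars x)

-- ===== PRECONDITION & SPEC =====
def Spec_has_isolated_double (x : Int) (out : Option Bool) : Prop := out = has_isolated_double_alt x
instance (x : Int) (out : Option Bool) : Decidable (Spec_has_isolated_double x out) := by unfold Spec_has_isolated_double; infer_instance

-- ===== CLAIM (what is proved, stated in full; the proofs are below) =====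
def Claim_equal_has_isolated_double : Prop := ∀ (x : Int), Dom_has_isolated_double x → Spec_has_isolated_double x (has_isolated_double x)

-- ===== LEMMAS AND PROOFS =====

-- A's loop rewritten as structural recursion carrying the same state; next = rest.head?
def fA (ppd pd : Option Char) (iso : Bool) : List Char → Bool
  | [] => iso
  | d :: rest =>
      let next := rest.head?
      let iso := if ppd = none ∧ pd = some d ∧ next ≠ some d then true else iso
      let iso := if ppd ≠ pd ∧ pd = some d ∧ next ≠ some d then true else iso
      let iso := if ppd ≠ pd ∧ pd = some d ∧ next = none then true else iso
      fA pd (some d) iso rest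

lemma bridge : ∀ (t pre : List Char) (ppd pd : Option Char) (iso : Bool),
    ((PySem.List.enumerate t (pre.length : Int)).foldl (stepA (pre ++ t)) (ppd, pd, iso)).2.2
      = fA ppd pd iso t := by
  intro t
  induction t with
  | nil => intro pre ppd pd iso; simp [PySem.List.enumerate_nil, fA]
  | cons d rest ih =>
      intro pre ppd pd iso
      rw [PySem.List.enumerate_cons, List.foldl_cons]
      have hstep : stepA (pre ++ d :: rest) (ppd, pd, iso) ((pre.length : Int), d)
          = (pd, some d,
              (if ppd ≠ pd ∧ pd = some d ∧ rest.head? = none then true else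
               if ppd ≠ pd ∧ pd = some d ∧ rest.head? ≠ some d then true else
               if ppd = none ∧ pd = some d ∧ rest.head? ≠ some d then true else iso)) := by
        have hnext : (if (pre.length : Int) < ((pre ++ d :: rest).length : Int) - 1
              then PySem.List.pyGet? (pre ++ d :: rest) ((pre.length : Int) + 1) else none)
            = rest.head? := by
          cases rest with
          | nil =>
              have : ¬ ((pre.length : Int) < ((pre ++ [d]).length : Int) - 1) := by
                simp [List.length_append]
              simp
          | cons e u =>
              have hlt : (pre.length : Int) < ((pre ++ d :: e :: u).length : Int) - 1 := by
                simp [List.length_append]; omega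
              have hg : PySem.List.pyGet? (pre ++ d :: e :: u) ((pre.length : Int) + 1)
                  = (d :: e :: u)[1]? := by
                simpa using PySem.List.pyGet?_append_right (pre := pre) (ys := d :: e :: u) (k := 1)
              simp [hg]
        simp only [stepA, hnext]
      rw [hstep]
      have h2 : (pre.length : Int) + 1 = (((pre ++ [d]).length : Nat) : Int) := by
        simp
      rw [h2]
      have h3 : pre ++ d :: rest = (pre ++ [d]) ++ rest := by simp
      rw [h3]
      rw [ih (pre ++ [d]) pd (some d) _]
      simp only [fA]

lemma altRun_nil : altRun ([] : List Char) = none := by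
  rw [altRun.eq_def]

lemma altRun_cons (c : Char) (rest : List Char) :
    altRun (c :: rest) = if 1 + (rest.takeWhile (fun d => d == c)).length = 2
      then some true else altRun (rest.dropWhile (fun d => d == c)) := by
  rw [altRun.eq_def]

lemma fA_true (s : List Char) : ∀ ppd pd, fA ppd pd true s = true := by
  induction s with
  | nil => intro ppd pd; simp [fA]
  | cons d rest ih =>
      intro ppd pd
      simp only [fA]
      split_ifs <;> exact ih _ _

-- stepping on a character that does not extend prev: no condition fires
lemma fA_cons_ne {ppd pd : Option Char} {d : Char} {rest : List Char} {iso : Bool}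
    (h : pd ≠ some d) : fA ppd pd iso (d :: rest) = fA pd (some d) iso rest := by
  simp [fA, h]

-- mid-run (ppd = pd): no condition fires
lemma fA_cons_eq {ppd pd : Option Char} {d : Char} {rest : List Char} {iso : Bool}
    (h : ppd = pd) : fA ppd pd iso (d :: rest) = fA pd (some d) iso rest := by
  subst h
  cases ppd <;> simp [fA]

-- run continues (next char equal): no condition fires
lemma fA_cons_cont {ppd pd : Option Char} {d : Char} {rest : List Char} {iso : Bool}
    (hnext : rest.head? = some d) : fA ppd pd iso (d :: rest) = fA pd (some d) iso rest := by
  simp [fA, hnext]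

-- an isolated double detected: second of a run of exactly 2
lemma fA_cons_trig {ppd pd : Option Char} {d : Char} {rest : List Char} {iso : Bool}
    (h : pd = some d) (hne : ppd ≠ pd) (hnext : rest.head? ≠ some d) :
    fA ppd pd iso (d :: rest) = fA pd (some d) true rest := by
  subst h
  simp [fA, hne, hnext]

lemma tw_ne {a b : Char} (h : ¬ a = b) (u : List Char) :
    List.takeWhile (fun x => x == b) (a :: u) = [] := by
  simp [h]

lemma dw_ne {a b : Char} (h : ¬ a = b) (u : List Char) :
    List.dropWhile (fun x => x == b) (a :: u) = a :: u := by
  simp [h]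

lemma altRun_shape_aux : ∀ (N : Nat) (s : List Char), s.length ≤ N →
    altRun s = none ∨ altRun s = some true := by
  intro N
  induction N with
  | zero =>
      intro s hs
      have : s = [] := List.eq_nil_of_length_eq_zero (Nat.le_zero.mp hs)
      subst this; left; exact altRun_nil
  | succ N ih =>
      intro s hs
      match s with
      | [] => left; exact altRun_nil
      | c :: rest =>
          rw [altRun_cons]
          split_ifs with h
          · right; rfl
          · exact ih _ (le_trans (List.length_dropWhile_le _ _) (by simpa using Nat.lt_succ_iff.mp (by simpa using hs)))

lemma altRun_shape (s : List Char) : altRun s = none ∨ altRun s = some true :=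
  altRun_shape_aux s.length s le_rfl

lemma MM : ∀ (N : Nat) (s : List Char), s.length ≤ N →
    ((∀ ppd pd, (∀ c, s.head? = some c → pd ≠ some c) →
        fA ppd pd false s = (altRun s).isSome)
     ∧ (∀ c, fA (some c) (some c) false s
        = (altRun (s.dropWhile (fun d => d == c))).isSome)) := by
  intro N
  induction N with
  | zero =>
      intro s hs
      have : s = [] := List.eq_nil_of_length_eq_zero (Nat.le_zero.mp hs)
      subst this
      constructor
      · intro ppd pd _; simp [fA, altRun_nil]
      · intro c; simp [fA, altRun_nil]
  | succ N ih =>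
      intro s hs
      match s with
      | [] =>
          constructor
          · intro ppd pd _; simp [fA, altRun_nil]
          · intro c; simp [fA, altRun_nil]
      | d :: rest =>
        have h1 : ∀ ppd pd, (∀ c, (d :: rest).head? = some c → pd ≠ some c) →
            fA ppd pd false (d :: rest) = (altRun (d :: rest)).isSome := by
          intro ppd pd hb
          have hpd : pd ≠ some d := hb d (by simp)
          rw [fA_cons_ne hpd]
          match rest with
          | [] =>
              rw [altRun_cons]; simp [fA, altRun_nil]
          | e :: u =>
            by_cases hed : e = d
            · subst hed
              -- run of d of length ≥ 2
              by_cases hu : u.head? = some e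
              · -- length ≥ 3: no trigger at second d, enter mid-run state
                rw [fA_cons_cont hu]
                match u, hu with
                | f :: v, hu =>
                  have hf : f = e := by simpa using hu
                  subst hf
                  have hlen : (f :: v).length ≤ N := by
                    simp at hs ⊢; omega
                  have := (ih (f :: v) hlen).2 f
                  rw [this]
                  rw [altRun_cons]
                  have htw : ((f :: f :: v).takeWhile (fun d => d == f)) = f :: f :: (v.takeWhile (fun d => d == f)) := by
                    simp [List.takeWhile]
                  have hdw : ((f :: f :: v).dropWhile (fun d => d == f)) = v.dropWhile (fun d => d == f) := by
                    simp [List.dropWhile]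
                  rw [htw, hdw]
                  have : ¬ (1 + (f :: f :: (v.takeWhile (fun d => d == f))).length = 2) := by
                    simp; omega
                  simp only [if_neg this]
                  have hdw2 : ((f :: v).dropWhile (fun d => d == f)) = v.dropWhile (fun d => d == f) := by
                    simp [List.dropWhile]
                  rw [hdw2]
              · -- run of exactly 2: trigger
                rw [fA_cons_trig rfl (fun hc => hpd (hc ▸ rfl)) hu]
                rw [fA_true]
                rw [altRun_cons]
                have htw : ((e :: u).takeWhile (fun d => d == e)) = e :: (u.takeWhile (fun d => d == e)) := by
                  simp [List.takeWhile]
                have hut : u.takeWhile (fun d => d == e) = [] := by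
                  match u with
                  | [] => rfl
                  | g :: w =>
                      exact tw_ne (fun hg => hu (by simp [hg])) w
                rw [htw, hut]
                simp
            · -- run of exactly 1
              have hlen : (e :: u).length ≤ N := by simp at hs ⊢; omega
              have hbd : ∀ c, (e :: u).head? = some c → (some d : Option Char) ≠ some c := by
                intro c hc
                simp at hc
                subst hc
                simpa [eq_comm] using hed
              have hmain := (ih (e :: u) hlen).1 pd (some d) hbd
              rw [hmain]
              conv_rhs => rw [altRun_cons]
              have hut : ((e :: u).takeWhile (fun x => x == d)) = [] := tw_ne hed u
              have hud : ((e :: u).dropWhile (fun x => x == d)) = e :: u := dw_ne hed u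
              rw [hut, hud]
              simp
        refine ⟨h1, ?_⟩
        intro c
        by_cases hdc : d = c
        · subst hdc
          rw [fA_cons_eq rfl]
          have hlen : rest.length ≤ N := by simp at hs; omega
          have := (ih rest hlen).2 d
          rw [this]
          have : ((d :: rest).dropWhile (fun x => x == d)) = rest.dropWhile (fun x => x == d) := by
            simp [List.dropWhile]
          rw [this]
        · have hb : ∀ e, (d :: rest).head? = some e → (some c : Option Char) ≠ some e := by
            intro e he
            simp at he; subst he
            simpa [eq_comm] using hdc
          rw [h1 (some c) (some c) hb]
          have : ((d :: rest).dropWhile (fun x => x == c)) = d :: rest := dw_ne hdc rest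
          rw [this]

-- ===== VERDICT (by name: the statement is the Claim_ definition above) =====
theorem has_isolated_double_spec : Claim_equal_has_isolated_double := by
  intro x _
  show has_isolated_double x = has_isolated_double_alt x
  simp only [has_isolated_double, has_isolated_double_alt]
  have hb := bridge (PySem.Int.toChars x) [] none none false
  simp only [List.nil_append, List.length_nil, Nat.cast_zero] at hb
  rw [hb]
  rw [(MM (PySem.Int.toChars x).length (PySem.Int.toChars x) le_rfl).1 none none (by intro c _; simp)]
  rcases altRun_shape (PySem.Int.toChars x) with h | h <;> simp [h]
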